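-- pv_equiv track=rewrite | github.com/phoenixding/scdiff | scdiff/scdiff.py | parseLR
-- ===== SOURCE A (Python) =====
-- def parseLR(etf,LRC):
-- 	out_etf=[]
-- 	for i in range(len(LRC[0])):
-- 			ct=0
-- 			for j in LRC:
-- 					ct+=1 if j[i]==0 else 0
-- 			if ct!=len(LRC):
-- 					out_etf.append(etf[i])
-- 	return out_etf
-- ===== SOURCE B (Python) =====
-- def parseLR(etf, LRC):
--     width = len(LRC[0])
--     keep = set()
--     for row in LRC:
--         for i, v in enumerate(row[:width]):
--             if v != 0:
--                 keep.add(i)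
--     return [etf[i] for i in range(width) if i in keep]
-- ===== Notes on version B (the rewrite author's own statement) =====
-- stated objective: alternative
-- what changed: Replaces A's column-major double loop (for each column, count zeros across all rows and compare to len(LRC)) with a single row-major pass that collects the indices of nonzero entries into a set, then selects etf entries by membership of the index in that set.
import Mathlib
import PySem

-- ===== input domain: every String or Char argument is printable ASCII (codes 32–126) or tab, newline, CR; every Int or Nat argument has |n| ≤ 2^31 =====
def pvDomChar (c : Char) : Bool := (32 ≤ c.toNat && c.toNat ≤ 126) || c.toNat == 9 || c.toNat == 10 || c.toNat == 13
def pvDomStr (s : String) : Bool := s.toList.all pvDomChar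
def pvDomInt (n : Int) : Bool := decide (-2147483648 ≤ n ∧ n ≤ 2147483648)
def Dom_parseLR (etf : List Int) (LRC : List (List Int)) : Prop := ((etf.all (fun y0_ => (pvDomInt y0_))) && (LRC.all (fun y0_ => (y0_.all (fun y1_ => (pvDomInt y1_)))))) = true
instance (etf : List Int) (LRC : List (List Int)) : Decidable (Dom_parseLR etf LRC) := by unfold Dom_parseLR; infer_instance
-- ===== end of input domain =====

-- B replaces A's column-major zero-counting (one inner scan per column) by a single
-- row-major pass that records the indices of nonzero entries in a set, then selects
-- etf entries by membership in that set. Same asymptotic cost; a different traversal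
-- order and data structure (a set of kept indices instead of per-column counters).

-- ===== PORT A =====
def parseLR (etf : List Int) (LRC : List (List Int)) : List Int :=
  (List.range (LRC.headI).length).foldl (fun out_etf (i : Nat) =>
    let ct : Int := LRC.foldl (fun ct j =>
      ct + (if (PySem.List.pyGet? j (i : Int)).getD 0 = 0 then (1 : Int) else 0)) 0
    if ct ≠ (LRC.length : Int) then out_etf ++ [(PySem.List.pyGet? etf (i : Int)).getD 0]
    else out_etf) []

-- ===== PORT B =====
-- width = len(LRC[0]); keep = set of column indices with a nonzero, built row by row
-- over row[:width]; result = [etf[i] for i in range(width) if i in keep].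
def parseLR_alt (etf : List Int) (LRC : List (List Int)) : List Int :=
  let width := (LRC.headI).length
  let keep : PySem.Set Int := LRC.foldl (fun k row =>
    (PySem.List.enumerate (PySem.List.slice row (some 0) (some (width : Int)))).foldl
      (fun k iv => if iv.2 ≠ 0 then PySem.Set.add k iv.1 else k) k) PySem.Set.empty
  ((List.range width).filter (fun i : Nat => PySem.Set.contains keep (i : Int))).map
    (fun i : Nat => (PySem.List.pyGet? etf (i : Int)).getD 0)

-- ===== PRECONDITION & SPEC =====
-- Pre_ excludes exactly the inputs where Python A raises IndexError: empty LRC (LRC[0]),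
-- a row shorter than LRC[0] (j[i]), or etf too short at a kept column index (etf[i]).
def Pre_parseLR (etf : List Int) (LRC : List (List Int)) : Prop :=
  LRC ≠ [] ∧ (∀ row ∈ LRC, (LRC.headI).length ≤ row.length) ∧
  (∀ i < (LRC.headI).length, (∃ row ∈ LRC, row.getD i 0 ≠ 0) → i < etf.length)
instance (etf : List Int) (LRC : List (List Int)) : Decidable (Pre_parseLR etf LRC) := by
  unfold Pre_parseLR; infer_instance

def pvWitness_parseLR : List Int × List (List Int) := ([3, 4], [[0, 1], [1, 0]])

def Spec_parseLR (etf : List Int) (LRC : List (List Int)) (out : List Int) : Prop := out = parseLR_alt etf LRC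
instance (etf : List Int) (LRC : List (List Int)) (out : List Int) : Decidable (Spec_parseLR etf LRC out) := by unfold Spec_parseLR; infer_instance

-- ===== CLAIM (what is proved, stated in full; the proofs are below) =====
def Claim_equal_parseLR : Prop := ∀ (etf : List Int) (LRC : List (List Int)), Dom_parseLR etf LRC → Pre_parseLR etf LRC → Spec_parseLR etf LRC (parseLR etf LRC)

-- ===== LEMMAS AND PROOFS =====

-- A's inner loop is a countP
lemma count_fold (p : List Int → Prop) [DecidablePred p] (l : List (List Int)) (a : Int) :
    l.foldl (fun ct j => ct + (if p j then (1 : Int) else 0)) a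
      = a + (l.countP (fun j => decide (p j)) : Int) := by
  induction l generalizing a with
  | nil => simp
  | cons x xs ih =>
    simp only [List.foldl_cons, List.countP_cons, ih]
    by_cases h : p x
    · simp [h]; ring
    · simp [h]

-- membership in the inner set-building fold over one enumerated row
lemma mem_fold_if (l : List (Int × Int)) (k : PySem.Set Int) (x : Int) :
    (x ∈ l.foldl (fun k iv => if iv.2 ≠ 0 then PySem.Set.add k iv.1 else k) k)
      ↔ x ∈ k ∨ ∃ p ∈ l, p.2 ≠ 0 ∧ x = p.1 := by
  induction l generalizing k with
  | nil => simp
  | cons h t ih =>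
    simp only [List.foldl_cons, ih]
    by_cases hv : h.2 = 0
    · simp [hv]
    · simp only [if_pos (by exact hv)]
      rw [PySem.Set.mem_add]
      constructor
      · rintro (⟨hk | hx⟩ | ⟨p, hp, hpne2, hpx⟩)
        · exact Or.inl hk
        · exact Or.inr ⟨h, by simp, hv, hx⟩
        · exact Or.inr ⟨p, by simp [hp], hpne2, hpx⟩
      · rintro (hk | ⟨p, hp, hpne, hpx⟩)
        · exact Or.inl (Or.inl hk)
        · rcases List.mem_cons.mp hp with rfl | hp'
          · exact Or.inl (Or.inr hpx)
          · exact Or.inr ⟨p, hp', hpne, hpx⟩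

-- membership in the keep set built by the row-major pass
lemma mem_keep (LRC : List (List Int)) (w : Nat) (k : PySem.Set Int) (x : Int) :
    (x ∈ LRC.foldl (fun k row =>
        (PySem.List.enumerate (PySem.List.slice row (some 0) (some (w : Int)))).foldl
          (fun k iv => if iv.2 ≠ 0 then PySem.Set.add k iv.1 else k) k) k)
      ↔ x ∈ k ∨ ∃ row ∈ LRC, ∃ p ∈ PySem.List.enumerate (PySem.List.slice row (some 0) (some (w : Int))),
          p.2 ≠ 0 ∧ x = p.1 := by
  induction LRC generalizing k with
  | nil => simp
  | cons r t ih =>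
    simp only [List.foldl_cons, ih, mem_fold_if]
    constructor
    · rintro (⟨hk | ⟨p, hp, hpne, hpx⟩⟩ | ⟨row, hrow, hrest⟩)
      · exact Or.inl hk
      · exact Or.inr ⟨r, by simp, p, hp, hpne, hpx⟩
      · exact Or.inr ⟨row, by simp [hrow], hrest⟩
    · rintro (hk | ⟨row, hrow, hrest⟩)
      · exact Or.inl (Or.inl hk)
      · rcases List.mem_cons.mp hrow with rfl | hrow'
        · exact Or.inl (Or.inr hrest)
        · exact Or.inr ⟨row, hrow', hrest⟩

-- for i < width and rows of length ≥ width, "i ∈ keep" says: some row is nonzero at i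
lemma keep_iff (LRC : List (List Int)) (w : Nat)
    (hlen : ∀ row ∈ LRC, w ≤ row.length) (i : Nat) (hi : i < w) :
    ((i : Int) ∈ LRC.foldl (fun k row =>
        (PySem.List.enumerate (PySem.List.slice row (some 0) (some (w : Int)))).foldl
          (fun k iv => if iv.2 ≠ 0 then PySem.Set.add k iv.1 else k) k) PySem.Set.empty)
      ↔ ∃ row ∈ LRC, row.getD i 0 ≠ 0 := by
  rw [mem_keep]
  have hempty : ((i : Int) ∈ (PySem.Set.empty : PySem.Set Int)) ↔ False := by
    simp [PySem.Set.empty]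
  rw [hempty, false_or]
  constructor
  · rintro ⟨row, hrow, p, hp, hpne, hpx⟩
    refine ⟨row, hrow, ?_⟩
    rw [PySem.List.slice_toNat row (le_refl (0:Int)) (Int.natCast_nonneg w)] at hp
    simp only [List.drop_zero, Int.toNat_natCast, Int.toNat_zero, Nat.sub_zero] at hp
    rcases (PySem.List.mem_enumerate_iff _ _ _).mp hp with ⟨j, hj, rfl⟩
    simp only [zero_add] at hpx hpne
    have hjw : j < w := by
      have := hj; simp [List.length_take] at this; omega
    have hji : j = i := by exact_mod_cast hpx.symm
    subst hji
    have hjr : j < row.length := lt_of_lt_of_le hjw (hlen row hrow)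
    have : (List.take w row)[j] = row.getD j 0 := by
      rw [List.getElem_take]
      simp [List.getD_eq_getElem?_getD, List.getElem?_eq_getElem hjr]
    rw [this] at hpne
    exact hpne
  · rintro ⟨row, hrow, hne⟩
    have hir : i < row.length := lt_of_lt_of_le hi (hlen row hrow)
    refine ⟨row, hrow, ((i : Int), row.getD i 0), ?_, hne, rfl⟩
    rw [PySem.List.slice_toNat row (le_refl (0:Int)) (Int.natCast_nonneg w)]
    simp only [List.drop_zero, Int.toNat_natCast, Int.toNat_zero, Nat.sub_zero]
    rw [PySem.List.mem_enumerate_iff]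
    refine ⟨i, ?_, ?_⟩
    · simp [List.length_take]; omega
    · have : (List.take w row)[i]'(by simp [List.length_take]; omega) = row.getD i 0 := by
        rw [List.getElem_take]
        simp [List.getD_eq_getElem?_getD, List.getElem?_eq_getElem hir]
      simp [this]

-- A's column guard "zero-count ≠ number of rows" also says: some row is nonzero at i
lemma guardA_iff (LRC : List (List Int)) (w : Nat)
    (hlen : ∀ row ∈ LRC, w ≤ row.length) (i : Nat) (hi : i < w) :
    (LRC.foldl (fun ct j =>
        ct + (if (PySem.List.pyGet? j (i : Int)).getD 0 = 0 then (1 : Int) else 0)) 0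
      ≠ (LRC.length : Int))
      ↔ ∃ row ∈ LRC, row.getD i 0 ≠ 0 := by
  rw [count_fold (fun j => (PySem.List.pyGet? j (i : Int)).getD 0 = 0) LRC 0]
  have hcnt : ∀ j ∈ LRC,
      (decide ((PySem.List.pyGet? j (i : Int)).getD 0 = 0) = true ↔ decide (j.getD i 0 = 0) = true) := by
    intro j hj
    have hij : i < j.length := lt_of_lt_of_le hi (hlen j hj)
    rw [PySem.List.pyGet?_natCast]
    simp [List.getElem?_eq_getElem hij, List.getD_eq_getElem?_getD]
  rw [List.countP_congr hcnt]
  constructor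
  · intro hne
    by_contra hno
    apply hne
    have hall : ∀ a ∈ LRC, (decide (a.getD i 0 = 0)) = true := by
      intro a ha
      by_contra hba
      exact hno ⟨a, ha, by simpa using hba⟩
    have hlenc : LRC.countP (fun j => decide (j.getD i 0 = 0)) = LRC.length :=
      List.countP_eq_length.mpr hall
    rw [hlenc]; ring
  · rintro ⟨r, hr, hrne⟩ heq
    have : LRC.countP (fun j => decide (j.getD i 0 = 0)) = LRC.length := by
      exact_mod_cast (by omega : (LRC.countP (fun j => decide (j.getD i 0 = 0)) : Int) = (LRC.length : Int))
    rw [List.countP_eq_length] at this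
    have := this r hr
    simp at this
    exact hrne this

-- ===== VERDICT (by name: the statement is the Claim_ definition above) =====
theorem parseLR_spec : Claim_equal_parseLR := by
  intro etf LRC _ hpre
  obtain ⟨h0, hlen, _⟩ := hpre
  unfold Spec_parseLR parseLR parseLR_alt
  set w := (LRC.headI).length with hw
  -- turn A's accumulating loop into filter-then-map
  have hA : (List.range w).foldl (fun out_etf (i : Nat) =>
      let ct : Int := LRC.foldl (fun ct j =>
        ct + (if (PySem.List.pyGet? j (i : Int)).getD 0 = 0 then (1 : Int) else 0)) 0
      if ct ≠ (LRC.length : Int) then out_etf ++ [(PySem.List.pyGet? etf (i : Int)).getD 0]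
      else out_etf) []
    = ((List.range w).filter (fun i : Nat => decide (LRC.foldl (fun ct j =>
        ct + (if (PySem.List.pyGet? j (i : Int)).getD 0 = 0 then (1 : Int) else 0)) 0
        ≠ (LRC.length : Int)))).map (fun i : Nat => (PySem.List.pyGet? etf (i : Int)).getD 0) := by
    rw [show (fun out_etf (i : Nat) =>
        let ct : Int := LRC.foldl (fun ct j =>
          ct + (if (PySem.List.pyGet? j (i : Int)).getD 0 = 0 then (1 : Int) else 0)) 0
        if ct ≠ (LRC.length : Int) then out_etf ++ [(PySem.List.pyGet? etf (i : Int)).getD 0]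
        else out_etf)
      = (fun out_etf (i : Nat) =>
        if (fun i => decide (LRC.foldl (fun ct j =>
            ct + (if (PySem.List.pyGet? j (i : Int)).getD 0 = 0 then (1 : Int) else 0)) 0
            ≠ (LRC.length : Int))) i = true
        then out_etf ++ [(PySem.List.pyGet? etf (i : Int)).getD 0] else out_etf) from by
        funext out i; simp]
    rw [PySem.List.foldl_append_if
      (fun i : Nat => decide (LRC.foldl (fun ct j =>
          ct + (if (PySem.List.pyGet? j (i : Int)).getD 0 = 0 then (1 : Int) else 0)) 0
          ≠ (LRC.length : Int)))
      (fun i : Nat => (PySem.List.pyGet? etf (i : Int)).getD 0)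
      (List.range w) [], List.nil_append]
  rw [hA]
  show _ = ((List.range w).filter (fun i : Nat => PySem.Set.contains
      (LRC.foldl (fun k row =>
        (PySem.List.enumerate (PySem.List.slice row (some 0) (some (w : Int)))).foldl
          (fun k iv => if iv.2 ≠ 0 then PySem.Set.add k iv.1 else k) k) PySem.Set.empty)
      (i : Int))).map (fun i : Nat => (PySem.List.pyGet? etf (i : Int)).getD 0)
  congr 1
  apply List.filter_congr
  intro i hi
  have hiw : i < w := List.mem_range.mp hi
  have hg := guardA_iff LRC w hlen i hiw
  have hk := keep_iff LRC w hlen i hiw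
  rw [Bool.eq_iff_iff, decide_eq_true_eq, PySem.Set.contains_iff, hk, hg]
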